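-- pv_equiv track=rewrite | github.com/YIXIN-YAO/slowfast_splitvideo | split.py | find
-- ===== SOURCE A (Python) =====
-- def find(label_list, target, max_stride):
--     """
--     从一个序列中找到最长的连续target序列
--     :param label_list:
--     :param target:
--     :param max_stride: 允许的最大步长，就是可以跳过max_stride-1个异常帧
--     :return: 返回最长序列的头节点和长度
--     """
--
--     def is_connected(pos):
--         for step in range(1, max_stride + 1):
--             if pos + step == len(label_list):
--                 break  # 防止越界
--             if label_list[pos + step] == target:
--                 return step
--         return 0
--
--     max_length = 0
--     start_pos = -1
--     for index, i in enumerate(label_list):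
--
--         if i == target:
--             if index > 0 and label_list[index - 1] == target:
--                 continue
--             else:  # 进入else的都是头节点
--                 length = 1
--                 while index != len(label_list) - 1 and is_connected(index):
--                     length += is_connected(index)
--                     index += is_connected(index)
--                 if length > max_length:
--                     max_length = length
--                     start_pos = index - max_length + 1
--     return start_pos, max_length
-- ===== SOURCE B (Python) =====
-- def find(label_list, target, max_stride):
--     # One left-to-right pass: group consecutive target positions whose gap is
--     # <= max_stride, tracking the best (start, span) seen so far.
--     best_start, best_len = -1, 0
--     run = None  # (cur_start, prev) of the current group of target positions
--     for i, v in enumerate(label_list):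
--         if v != target:
--             continue
--         if run is None or i - run[1] > max_stride:
--             run = (i, i)
--         else:
--             run = (run[0], i)
--         span = i - run[0] + 1
--         if span > best_len:
--             best_len = span
--             best_start = run[0]
--     return best_start, best_len
-- ===== Notes on version B (the rewrite author's own statement) =====
-- stated objective: alternative
-- what changed: A re-scans forward from every head position (an is_connected probe of up to max_stride frames per hop, and the whole chain re-walked for each head inside a group); B makes one left-to-right pass that groups consecutive target positions with gap <= max_stride and tracks the best (start, span) incrementally.
import Mathlib
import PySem

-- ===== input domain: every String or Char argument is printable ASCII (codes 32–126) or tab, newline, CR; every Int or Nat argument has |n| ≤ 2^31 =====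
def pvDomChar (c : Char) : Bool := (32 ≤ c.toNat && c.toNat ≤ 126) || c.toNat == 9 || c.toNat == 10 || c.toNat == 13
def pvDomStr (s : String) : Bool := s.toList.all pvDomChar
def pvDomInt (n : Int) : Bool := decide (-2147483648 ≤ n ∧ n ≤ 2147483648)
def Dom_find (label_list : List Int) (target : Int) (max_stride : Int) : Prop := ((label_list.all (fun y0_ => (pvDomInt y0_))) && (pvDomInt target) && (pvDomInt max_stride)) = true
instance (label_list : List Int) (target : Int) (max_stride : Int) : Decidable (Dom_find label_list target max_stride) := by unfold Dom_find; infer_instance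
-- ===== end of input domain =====

-- B replaces A's per-head forward re-scanning (is_connected probes + an inner while walk
-- restarted at every head) by a single left-to-right pass that groups consecutive target
-- positions with gap ≤ max_stride and tracks the best span incrementally (alternative).

-- ===== PORT A =====
-- helper `is_connected`: scan steps 1..max_stride; `break` when pos+step == len; return
-- first step whose frame is the target.  The `none` branch of pyGet? is unreachable in
-- A's calls (the break above guards the bound) and mirrors Python's IndexError-free path.
def isConnAux (xs : List Int) (t p : Int) : List Int → Int
  | [] => 0
  | step :: rest =>
    if p + step = (xs.length : Int) then 0
    else
      match PySem.List.pyGet? xs (p + step) with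
      | some v => if v = t then step else isConnAux xs t p rest
      | none => 0

def isConn (xs : List Int) (t ms p : Int) : Int :=
  isConnAux xs t p (PySem.List.pyRange 1 (ms + 1) 1)

-- termination fact for the `while` loop below (cited by `decreasing_by`)
theorem isConnAux_bounds (xs : List Int) (t p : Int) :
    ∀ steps : List Int, (∀ s ∈ steps, 1 ≤ s) → isConnAux xs t p steps ≠ 0 →
      1 ≤ isConnAux xs t p steps ∧ p + isConnAux xs t p steps < (xs.length : Int) := by
  intro steps
  induction steps with
  | nil => intro _ h; simp [isConnAux] at h
  | cons s rest ih =>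
    intro hs h
    simp only [isConnAux] at h ⊢
    by_cases hlen : p + s = (xs.length : Int)
    · simp [hlen] at h
    · simp only [if_neg hlen] at h ⊢
      rcases hg : PySem.List.pyGet? xs (p + s) with _ | v
      · rw [hg] at h; simp at h
      · rw [hg] at h
        have hred : (match (some v : Option Int) with
            | some v => if v = t then s else isConnAux xs t p rest
            | none => 0) = if v = t then s else isConnAux xs t p rest := rfl
        rw [hred] at h ⊢
        by_cases hv : v = t
        · simp only [if_pos hv]
          refine ⟨hs s (by simp), ?_⟩
          have hin : PySem.Raise.InRange xs.length (p + s) := by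
            by_contra hc
            rw [(PySem.List.pyGet?_eq_none_iff _ _).mpr hc] at hg; cases hg
          simp [PySem.Raise.InRange] at hin
          omega
        · simp only [if_neg hv] at h ⊢
          exact ih (fun x hx => hs x (by simp [hx])) h

theorem isConn_bounds (xs : List Int) (t ms p : Int) (h : isConn xs t ms p ≠ 0) :
    1 ≤ isConn xs t ms p ∧ p + isConn xs t ms p < (xs.length : Int) := by
  refine isConnAux_bounds xs t p _ ?_ h
  intro s hs
  have := (PySem.List.mem_pyRange_one).mp hs
  omega

-- the inner `while index != len(label_list)-1 and is_connected(index):` loop of A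
def whileA (xs : List Int) (t ms : Int) (index length : Int) : Int × Int :=
  if _h : index ≠ (xs.length : Int) - 1 ∧ isConn xs t ms index ≠ 0 then
    whileA xs t ms (index + isConn xs t ms index) (length + isConn xs t ms index)
  else (index, length)
termination_by ((xs.length : Int) - index).toNat
decreasing_by
  have := isConn_bounds xs t ms index _h.2
  omega

def find (label_list : List Int) (target : Int) (max_stride : Int) : Int × Int :=
  let r := (PySem.List.enumerate label_list 0).foldl
    (fun (acc : Int × Int) (pr : Int × Int) =>
      if pr.2 = target then
        if 0 < pr.1 ∧ PySem.List.pyGet? label_list (pr.1 - 1) = some target then acc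
        else
          let w := whileA label_list target max_stride pr.1 1
          if w.2 > acc.1 then (w.2, w.1 - w.2 + 1) else acc
      else acc)
    (0, -1)
  (r.2, r.1)

-- ===== PORT B =====
-- single pass; state = (best_start, best_len, run) with run = some (cur_start, prev)
def find_alt (label_list : List Int) (target : Int) (max_stride : Int) : Int × Int :=
  let st := (PySem.List.enumerate label_list 0).foldl
    (fun (st : Int × Int × Option (Int × Int)) (pr : Int × Int) =>
      if pr.2 ≠ target then st
      else
        let run := match st.2.2 with
          | none => (pr.1, pr.1)
          | some r => if pr.1 - r.2 > max_stride then (pr.1, pr.1) else (r.1, pr.1)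
        let span := pr.1 - run.1 + 1
        if span > st.2.1 then (run.1, span, some run) else (st.1, st.2.1, some run))
    (-1, 0, none)
  (st.1, st.2.1)

-- ===== PRECONDITION & SPEC =====
def Spec_find (label_list : List Int) (target : Int) (max_stride : Int) (out : Int × Int) : Prop := out = find_alt label_list target max_stride
instance (label_list : List Int) (target : Int) (max_stride : Int) (out : Int × Int) : Decidable (Spec_find label_list target max_stride out) := by unfold Spec_find; infer_instance

-- ===== CLAIM (what is proved, stated in full; the proofs are below) =====
def Claim_equal_find : Prop := ∀ (label_list : List Int) (target : Int) (max_stride : Int), Dom_find label_list target max_stride → Spec_find label_list target max_stride (find label_list target max_stride)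

-- ===== LEMMAS AND PROOFS =====

-- `j` is a (valid, nonnegative) position of the target in xs
def Tgt (xs : List Int) (t j : Int) : Prop := 0 ≤ j ∧ PySem.List.pyGet? xs j = some t

-- the list of target positions, in order
def tpos (xs : List Int) (t : Int) : List Int :=
  ((PySem.List.enumerate xs 0).filter (fun pr => pr.2 == t)).map Prod.fst

-- end position of the chain A's while-loop walks, read off the remaining target positions
def chainEnd (ms : Int) : Int → List Int → Int
  | p, [] => p
  | p, q :: l => if q - p ≤ ms then chainEnd ms q l else p

-- split the remaining target positions into the current gap-≤ms group and the rest
def grp (ms : Int) : Int → List Int → List Int × List Int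
  | _, [] => ([], [])
  | p, q :: l =>
    if q - p ≤ ms then ((q :: (grp ms q l).1), (grp ms q l).2)
    else ([], q :: l)

-- the group is an increasing chain with gaps ≤ ms, anchored at p
def GrpChain (ms : Int) : Int → List Int → Prop
  | _, [] => True
  | p, q :: l => p < q ∧ q - p ≤ ms ∧ GrpChain ms q l

-- A's loop body / B's loop body, specialised to a target position
def bodyA (xs : List Int) (t ms : Int) (acc : Int × Int) (i : Int) : Int × Int :=
  if 0 < i ∧ PySem.List.pyGet? xs (i - 1) = some t then acc
  else
    let w := whileA xs t ms i 1
    if w.2 > acc.1 then (w.2, w.1 - w.2 + 1) else acc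

def bodyB (ms : Int) (st : Int × Int × Option (Int × Int)) (i : Int) : Int × Int × Option (Int × Int) :=
  let run := match st.2.2 with
    | none => (i, i)
    | some r => if i - r.2 > ms then (i, i) else (r.1, i)
  let span := i - run.1 + 1
  if span > st.2.1 then (run.1, span, some run) else (st.1, st.2.1, some run)

theorem Tgt_lt_len (xs : List Int) (t j : Int) (h : Tgt xs t j) : j < (xs.length : Int) := by
  have hin : PySem.Raise.InRange xs.length j := by
    by_contra hc
    have h2 := h.2
    rw [(PySem.List.pyGet?_eq_none_iff _ _).mpr hc] at h2
    cases h2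
  simp [PySem.Raise.InRange] at hin
  omega

theorem foldl_filter_tgt {σ : Type} (t : Int) (g : σ → Int → σ) :
    ∀ (l : List (Int × Int)) (st : σ),
      l.foldl (fun acc pr => if pr.2 = t then g acc pr.1 else acc) st
        = ((l.filter (fun pr => pr.2 == t)).map Prod.fst).foldl g st := by
  intro l
  induction l with
  | nil => intro st; rfl
  | cons pr l2 ih =>
    intro st
    rw [List.foldl_cons]
    by_cases h : pr.2 = t
    · rw [if_pos h, ih]; simp [h]
    · rw [if_neg h, ih]; simp [h]

theorem foldl_filter_tgt' {σ : Type} (t : Int) (g : σ → Int → σ) :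
    ∀ (l : List (Int × Int)) (st : σ),
      l.foldl (fun acc pr => if pr.2 ≠ t then acc else g acc pr.1) st
        = ((l.filter (fun pr => pr.2 == t)).map Prod.fst).foldl g st := by
  intro l
  induction l with
  | nil => intro st; rfl
  | cons pr l2 ih =>
    intro st
    rw [List.foldl_cons]
    by_cases h : pr.2 = t
    · rw [if_neg (by simp [h]), ih]; simp [h]
    · rw [if_pos (by simp [h]), ih]; simp [h]

theorem tpos_pairwise (xs : List Int) (t : Int) : List.Pairwise (· < ·) (tpos xs t) := by
  unfold tpos
  rw [List.pairwise_map]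
  exact (PySem.List.pairwise_lt_enumerate xs 0).filter _

theorem tpos_tgt (xs : List Int) (t : Int) : ∀ x ∈ tpos xs t, Tgt xs t x := by
  intro x hx
  unfold tpos at hx
  rcases List.mem_map.mp hx with ⟨pr, hpr, hfst⟩
  have hmem := List.mem_filter.mp hpr
  have ht : pr.2 = t := by simpa using hmem.2
  rcases (PySem.List.mem_enumerate_iff _ _ _).mp hmem.1 with ⟨k, hk, hpr_eq⟩
  subst hpr_eq
  simp only [zero_add] at hfst ht
  subst hfst
  refine ⟨by omega, ?_⟩
  rw [PySem.List.pyGet?_natCast]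
  simp [List.getElem?_eq_getElem hk, ht]

theorem tpos_complete (xs : List Int) (t : Int) : ∀ j, Tgt xs t j → j ∈ tpos xs t := by
  intro j hj
  obtain ⟨hj0, hget⟩ := hj
  rw [PySem.List.pyGet?_of_nonneg (h := hj0)] at hget
  have hlt : j.toNat < xs.length := by
    by_contra hc
    rw [List.getElem?_eq_none (by omega)] at hget
    cases hget
  have hval : xs[j.toNat] = t := by
    rw [List.getElem?_eq_getElem hlt] at hget
    exact Option.some.inj hget
  unfold tpos
  refine List.mem_map.mpr ⟨((j.toNat : Int), t), ?_, by simp; omega⟩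
  refine List.mem_filter.mpr ⟨?_, by simp⟩
  exact (PySem.List.mem_enumerate_iff _ _ _).mpr ⟨j.toNat, hlt, by simp [hval]⟩

theorem isConnAux_next (xs : List Int) (t p q : Int) (h0 : 0 ≤ p) (hq : Tgt xs t q)
    (hmin : ∀ j, p < j → j < q → ¬ Tgt xs t j) :
    ∀ (k : Nat) (a b : Int), 1 ≤ a → p + a ≤ q → q - p - a ≤ (k : Int) →
      isConnAux xs t p (PySem.List.pyRange a b 1) = if q - p ≤ b - 1 then q - p else 0 := by
  have hqlen : q < (xs.length : Int) := Tgt_lt_len xs t q hq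
  intro k
  induction k with
  | zero =>
    intro a b ha haq hk
    have haq' : p + a = q := by omega
    by_cases hab : b ≤ a
    · rw [PySem.List.pyRange_one_eq_nil hab]
      simp only [isConnAux]
      rw [if_neg (by omega)]
    · rw [PySem.List.pyRange_one_cons (by omega)]
      simp only [isConnAux]
      rw [if_neg (by omega)]
      rw [show p + a = q from haq', hq.2]
      show (if t = t then a else isConnAux xs t p (PySem.List.pyRange (a + 1) b 1)) = _
      rw [if_pos rfl, if_pos (by omega)]
      omega
  | succ k ih =>
    intro a b ha haq hk
    by_cases hab : b ≤ a
    · rw [PySem.List.pyRange_one_eq_nil hab]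
      simp only [isConnAux]
      rw [if_neg (by omega)]
    · rw [PySem.List.pyRange_one_cons (by omega)]
      simp only [isConnAux]
      rw [if_neg (by omega)]
      by_cases heq : p + a = q
      · rw [heq, hq.2]
        show (if t = t then a else isConnAux xs t p (PySem.List.pyRange (a + 1) b 1)) = _
        rw [if_pos rfl, if_pos (by omega)]
        omega
      · have hlt' : p + a < q := by omega
        have hget : PySem.List.pyGet? xs (p + a) = some xs[(p + a).toNat] := by
          rw [PySem.List.pyGet?_of_nonneg (h := by omega)]
          exact List.getElem?_eq_getElem (by omega)
        rw [hget]
        show (if xs[(p + a).toNat] = t then a else isConnAux xs t p (PySem.List.pyRange (a + 1) b 1)) = _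
        have hv : ¬ xs[(p + a).toNat] = t := by
          intro hvt
          exact hmin (p + a) (by omega) hlt' ⟨by omega, by rw [hget, hvt]⟩
        rw [if_neg hv]
        exact ih (a + 1) b (by omega) (by omega) (by omega)

theorem isConnAux_nofind (xs : List Int) (t p : Int) (h0 : 0 ≤ p)
    (hno : ∀ j, p < j → ¬ Tgt xs t j) :
    ∀ (k : Nat) (a b : Int), 1 ≤ a → b - a ≤ (k : Int) →
      isConnAux xs t p (PySem.List.pyRange a b 1) = 0 := by
  intro k
  induction k with
  | zero =>
    intro a b ha hk
    rw [PySem.List.pyRange_one_eq_nil (by omega)]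
    rfl
  | succ k ih =>
    intro a b ha hk
    by_cases hab : b ≤ a
    · rw [PySem.List.pyRange_one_eq_nil hab]; rfl
    · rw [PySem.List.pyRange_one_cons (by omega)]
      simp only [isConnAux]
      by_cases hlen : p + a = (xs.length : Int)
      · rw [if_pos hlen]
      · rw [if_neg hlen]
        rcases hget : PySem.List.pyGet? xs (p + a) with _ | v
        · rfl
        · show (if v = t then a else isConnAux xs t p (PySem.List.pyRange (a + 1) b 1)) = _
          have hv : ¬ v = t := by
            intro hvt
            exact hno (p + a) (by omega) ⟨by omega, by rw [hget, hvt]⟩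
          rw [if_neg hv]
          exact ih (a + 1) b (by omega) (by omega)

theorem isConn_next (xs : List Int) (t ms p q : Int) (h0 : 0 ≤ p) (hq : Tgt xs t q) (hpq : p < q)
    (hmin : ∀ j, p < j → j < q → ¬ Tgt xs t j) :
    isConn xs t ms p = if q - p ≤ ms then q - p else 0 := by
  unfold isConn
  have := isConnAux_next xs t p q h0 hq hmin (q - p - 1).toNat 1 (ms + 1)
    (by omega) (by omega) (by omega)
  rw [show ms + 1 - 1 = ms from by omega] at this
  exact this

theorem isConn_nofind (xs : List Int) (t ms p : Int) (h0 : 0 ≤ p)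
    (hno : ∀ j, p < j → ¬ Tgt xs t j) : isConn xs t ms p = 0 := by
  unfold isConn
  exact isConnAux_nofind xs t p h0 hno ms.toNat 1 (ms + 1) (by omega) (by omega)

theorem whileA_chainEnd (xs : List Int) (t ms : Int) :
    ∀ (l : List Int) (p L : Int), Tgt xs t p → List.Pairwise (· < ·) (p :: l) →
      (∀ x ∈ l, Tgt xs t x) → (∀ j, p < j → Tgt xs t j → j ∈ l) →
      whileA xs t ms p L = (chainEnd ms p l, L + (chainEnd ms p l - p)) := by
  intro l
  induction l with
  | nil =>
    intro p L hp _ _ hcomp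
    have hno : ∀ j, p < j → ¬ Tgt xs t j := fun j hj ht => by simpa using hcomp j hj ht
    have hc : isConn xs t ms p = 0 := isConn_nofind xs t ms p hp.1 hno
    rw [whileA, dif_neg (by simp [hc])]
    simp [chainEnd]
  | cons q l2 ih =>
    intro p L hp hpair hall hcomp
    have hq : Tgt xs t q := hall q (by simp)
    have hpq : p < q := (List.pairwise_cons.mp hpair).1 q (by simp)
    have hmin : ∀ j, p < j → j < q → ¬ Tgt xs t j := by
      intro j hj1 hj2 htj
      rcases List.mem_cons.mp (hcomp j hj1 htj) with h | h
      · omega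
      · have := (List.pairwise_cons.mp (List.pairwise_cons.mp hpair).2).1 j h
        omega
    have hic := isConn_next xs t ms p q hp.1 hq hpq hmin
    have htail : List.Pairwise (· < ·) (q :: l2) := (List.pairwise_cons.mp hpair).2
    by_cases hgap : q - p ≤ ms
    · have hc : isConn xs t ms p = q - p := by rw [hic, if_pos hgap]
      have hqlen : q < (xs.length : Int) := Tgt_lt_len xs t q hq
      rw [whileA, dif_pos ⟨by omega, by rw [hc]; omega⟩, hc]
      rw [show p + (q - p) = q from by omega]
      have hall2 : ∀ x ∈ l2, Tgt xs t x := fun x hx => hall x (by simp [hx])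
      have hcomp2 : ∀ j, q < j → Tgt xs t j → j ∈ l2 := by
        intro j hj htj
        rcases List.mem_cons.mp (hcomp j (by omega) htj) with h | h
        · omega
        · exact h
      rw [ih q (L + (q - p)) hq htail hall2 hcomp2]
      simp only [chainEnd, if_pos hgap]
      have harith : L + (q - p) + (chainEnd ms q l2 - q) = L + (chainEnd ms q l2 - p) := by omega
      rw [harith]
    · have hc : isConn xs t ms p = 0 := by rw [hic, if_neg hgap]
      rw [whileA, dif_neg (by simp [hc])]
      simp only [chainEnd, if_neg hgap]
      simp

theorem grp_append (ms : Int) : ∀ (l : List Int) (p : Int), (grp ms p l).1 ++ (grp ms p l).2 = l := by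
  intro l
  induction l with
  | nil => intro p; rfl
  | cons q l2 ih =>
    intro p
    by_cases h : q - p ≤ ms
    · simp [grp, h, ih q]
    · simp [grp, h]

theorem grp_chain (ms : Int) : ∀ (l : List Int) (p : Int), List.Pairwise (· < ·) (p :: l) →
    GrpChain ms p (grp ms p l).1 := by
  intro l
  induction l with
  | nil => intro p _; trivial
  | cons q l2 ih =>
    intro p hp
    by_cases h : q - p ≤ ms
    · simp only [grp, if_pos h]
      exact ⟨(List.pairwise_cons.mp hp).1 q (by simp), h, ih q (List.pairwise_cons.mp hp).2⟩
    · simp only [grp, if_neg h]; trivial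

theorem grp_head_gap (ms : Int) : ∀ (l : List Int) (p : Int),
    ∀ z ∈ (grp ms p l).2.head?, z - (grp ms p l).1.getLastD p > ms := by
  intro l
  induction l with
  | nil => intro p z hz; simp [grp] at hz
  | cons q l2 ih =>
    intro p z hz
    by_cases h : q - p ≤ ms
    · simp only [grp, if_pos h] at hz ⊢
      rw [List.getLastD_cons]
      exact ih q z hz
    · simp only [grp, if_neg h] at hz ⊢
      simp at hz
      subst hz
      simpa using by omega

theorem chainEnd_stop (ms : Int) : ∀ (g : List Int) (r : List Int) (p : Int), GrpChain ms p g →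
    (∀ z ∈ r.head?, z - g.getLastD p > ms) → chainEnd ms p (g ++ r) = g.getLastD p := by
  intro g
  induction g with
  | nil =>
    intro r p _ hr
    cases r with
    | nil => rfl
    | cons z r2 =>
      have := hr z (by simp)
      simp only [List.nil_append, chainEnd, List.getLastD_nil] at *
      rw [if_neg (by omega)]
  | cons h g2 ih =>
    intro r p hc hr
    obtain ⟨_, hle, hctail⟩ := hc
    simp only [List.cons_append, chainEnd, if_pos hle, List.getLastD_cons]
    exact ih r h hctail (by intro z hz; have := hr z hz; rwa [List.getLastD_cons] at this)

theorem GrpChain_le_getLastD (ms : Int) : ∀ (g : List Int) (p : Int), GrpChain ms p g →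
    p ≤ g.getLastD p ∧ ∀ x ∈ g, x ≤ g.getLastD p := by
  intro g
  induction g with
  | nil => intro p _; simp
  | cons q g2 ih =>
    intro p hc
    obtain ⟨hpq, _, htail⟩ := hc
    obtain ⟨h1, h2⟩ := ih q htail
    rw [List.getLastD_cons]
    refine ⟨by omega, ?_⟩
    intro x hx
    rcases List.mem_cons.mp hx with h | h
    · subst h; omega
    · exact h2 x h

theorem GA2 (xs : List Int) (t ms : Int) (r : List Int) :
    ∀ (g : List Int) (q : Int) (st : Int × Int), GrpChain ms q g →
      List.Pairwise (· < ·) (q :: (g ++ r)) → (∀ x ∈ g ++ r, Tgt xs t x) →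
      (∀ j, q < j → Tgt xs t j → j ∈ g ++ r) →
      (∀ z ∈ r.head?, z - g.getLastD q > ms) →
      g.getLastD q - q + 1 ≤ st.1 →
      List.foldl (bodyA xs t ms) st g = st := by
  intro g
  induction g with
  | nil => intro q st _ _ _ _ _ _; rfl
  | cons h g2 ih =>
    intro q st hc hpair hall hcomp hgapr hst
    obtain ⟨hqh, hgap, hctail⟩ := hc
    have hTh : Tgt xs t h := hall h (by simp)
    have hpair2 : List.Pairwise (· < ·) (h :: (g2 ++ r)) := by
      have := (List.pairwise_cons.mp hpair).2
      simpa using this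
    have hall2 : ∀ x ∈ g2 ++ r, Tgt xs t x := fun x hx => hall x (by simp at hx ⊢; tauto)
    have hcomp2 : ∀ j, h < j → Tgt xs t j → j ∈ g2 ++ r := by
      intro j hj htj
      have hm := hcomp j (by omega) htj
      simp only [List.cons_append, List.mem_cons] at hm
      rcases hm with h' | h'
      · omega
      · exact h'
    have hgl : (h :: g2).getLastD q = g2.getLastD h := List.getLastD_cons
    have hgapr2 : ∀ z ∈ r.head?, z - g2.getLastD h > ms := by
      intro z hz
      have := hgapr z hz
      rwa [hgl] at this
    have hhe : h ≤ g2.getLastD h := (GrpChain_le_getLastD ms g2 h hctail).1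
    rw [hgl] at hst
    rw [List.foldl_cons]
    have hbody : bodyA xs t ms st h = st := by
      unfold bodyA
      by_cases hh : 0 < h ∧ PySem.List.pyGet? xs (h - 1) = some t
      · rw [if_pos hh]
      · rw [if_neg hh]
        have hw := whileA_chainEnd xs t ms (g2 ++ r) h 1 hTh hpair2 hall2 hcomp2
        have hce : chainEnd ms h (g2 ++ r) = g2.getLastD h := chainEnd_stop ms g2 r h hctail hgapr2
        rw [hw, hce]
        simp only
        rw [if_neg (by omega)]
    rw [hbody]
    exact ih h st hctail hpair2 hall2 hcomp2 hgapr2 (by omega)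

theorem GB2 (ms q : Int) :
    ∀ (g : List Int) (ph bs bl : Int), GrpChain ms ph g →
      (ph - q + 1 ≤ bl ∨ (bs = q ∧ bl = ph - q + 1)) →
      List.foldl (bodyB ms) (bs, bl, some (q, ph)) g
        = if g.getLastD ph - q + 1 > bl then (q, g.getLastD ph - q + 1, some (q, g.getLastD ph))
          else (bs, bl, some (q, g.getLastD ph)) := by
  intro g
  induction g with
  | nil =>
    intro ph bs bl _ hinv
    rw [List.getLastD_nil, if_neg (by omega)]
    rfl
  | cons h g2 ih =>
    intro ph bs bl hc hinv
    obtain ⟨hph, hgap, hctail⟩ := hc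
    have hlast : h ≤ g2.getLastD h := (GrpChain_le_getLastD ms g2 h hctail).1
    have hb : bodyB ms (bs, bl, some (q, ph)) h
        = if h - q + 1 > bl then (q, h - q + 1, some (q, h)) else (bs, bl, some (q, h)) := by
      simp [bodyB, if_neg (show ¬ h - ph > ms from by omega)]
    rw [List.foldl_cons, hb, List.getLastD_cons]
    by_cases hspan : h - q + 1 > bl
    · rw [if_pos hspan]
      rw [ih h q (h - q + 1) hctail (Or.inr ⟨rfl, rfl⟩)]
      by_cases hls : g2.getLastD h - q + 1 > h - q + 1
      · rw [if_pos hls, if_pos (by omega)]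
      · have : g2.getLastD h = h := by omega
        rw [if_neg hls, if_pos (by omega), this]
    · rw [if_neg hspan]
      exact ih h bs bl hctail (Or.inl (by omega))

theorem MAIN (xs : List Int) (t ms : Int) :
    ∀ (n : Nat) (l : List Int), l.length ≤ n → ∀ (pvOpt : Option Int) (m sp cs : Int),
      List.Pairwise (· < ·) l →
      (∀ x ∈ l, Tgt xs t x) →
      (match pvOpt with
       | none => m = 0 ∧ ∀ j, Tgt xs t j → j ∈ l
       | some pv => Tgt xs t pv ∧ (∀ x ∈ l, pv < x) ∧ (∀ j, pv < j → Tgt xs t j → j ∈ l) ∧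
           (∀ z ∈ l.head?, z - pv > ms) ∧ 1 ≤ m) →
      List.foldl (bodyA xs t ms) (m, sp) l
        = ((List.foldl (bodyB ms) (sp, m, pvOpt.map fun pv => (cs, pv)) l).2.1,
           (List.foldl (bodyB ms) (sp, m, pvOpt.map fun pv => (cs, pv)) l).1) := by
  intro n
  induction n with
  | zero =>
    intro l hl pvOpt m sp cs _ _ _
    have hnil : l = [] := List.eq_nil_of_length_eq_zero (by omega)
    subst hnil
    rfl
  | succ n ih =>
    intro l hl pvOpt m sp cs hpair hall hinv
    cases l with
    | nil => rfl
    | cons q l2 =>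
      have hTq : Tgt xs t q := hall q (by simp)
      have hq_lt : ∀ x ∈ l2, q < x := (List.pairwise_cons.mp hpair).1
      have hpairl2 : List.Pairwise (· < ·) l2 := (List.pairwise_cons.mp hpair).2
      have halll2 : ∀ x ∈ l2, Tgt xs t x := fun x hx => hall x (by simp [hx])
      have hl2 : l2.length ≤ n := by simpa using hl
      have hcompq : ∀ j, q < j → Tgt xs t j → j ∈ l2 := by
        intro j hj htj
        cases pvOpt with
        | none =>
          obtain ⟨_, hcompl⟩ := hinv
          rcases List.mem_cons.mp (hcompl j htj) with h | h
          · omega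
          · exact h
        | some pv =>
          obtain ⟨_, hlt, hcompl, _, _⟩ := hinv
          have hpv : pv < q := hlt q (by simp)
          rcases List.mem_cons.mp (hcompl j (by omega) htj) with h | h
          · omega
          · exact h
      by_cases hhead : (0 < q ∧ PySem.List.pyGet? xs (q - 1) = some t)
      · -- A skips q (its left neighbour is a target); only possible with ms ≤ 0
        have hTq1 : Tgt xs t (q - 1) := ⟨by omega, hhead.2⟩
        cases pvOpt with
        | none =>
          exfalso
          obtain ⟨_, hcompl⟩ := hinv
          rcases List.mem_cons.mp (hcompl (q - 1) hTq1) with h | h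
          · omega
          · exact absurd (hq_lt _ h) (by omega)
        | some pv =>
          obtain ⟨hTpv, hlt, hcompl, hhd, hm1⟩ := hinv
          have hpvq : pv < q := hlt q (by simp)
          have hpv_eq : pv = q - 1 := by
            by_cases hc : pv < q - 1
            · exfalso
              rcases List.mem_cons.mp (hcompl (q - 1) (by omega) hTq1) with h | h
              · omega
              · exact absurd (hq_lt _ h) (by omega)
            · omega
          have hms : q - pv > ms := hhd q (by simp)
          have hms0 : ms ≤ 0 := by omega
          have hA : bodyA xs t ms (m, sp) q = (m, sp) := by
            unfold bodyA
            rw [if_pos hhead]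
          have hB : bodyB ms (sp, m, some (cs, pv)) q = (sp, m, some (q, q)) := by
            simp only [bodyB]
            rw [if_pos (show q - pv > ms from hms)]
            rw [if_neg (show ¬ q - q + 1 > m from by omega)]
          rw [List.foldl_cons, List.foldl_cons, Option.map_some, hA, hB]
          exact ih l2 hl2 (some q) m sp q hpairl2 halll2
            ⟨hTq, hq_lt, hcompq, fun z hz => by
              have := hq_lt z (List.mem_of_mem_head? hz); omega, hm1⟩
      · -- A processes q as the head of the current group
        have hgr : (grp ms q l2).1 ++ (grp ms q l2).2 = l2 := grp_append ms l2 q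
        set g := (grp ms q l2).1 with hgdef
        set r := (grp ms q l2).2 with hrdef
        have hgc : GrpChain ms q g := grp_chain ms l2 q hpair
        have hgap : ∀ z ∈ r.head?, z - g.getLastD q > ms := grp_head_gap ms l2 q
        have he := GrpChain_le_getLastD ms g q hgc
        have hS1 : 1 ≤ g.getLastD q - q + 1 := by omega
        have hcomp_gr : ∀ j, q < j → Tgt xs t j → j ∈ g ++ r := by rw [hgr]; exact hcompq
        have hpair_gr : List.Pairwise (· < ·) (q :: (g ++ r)) := by rw [hgr]; exact hpair
        have hall_gr : ∀ x ∈ g ++ r, Tgt xs t x := by rw [hgr]; exact halll2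
        have hw := whileA_chainEnd xs t ms l2 q 1 hTq hpair halll2 hcompq
        have hce : chainEnd ms q l2 = g.getLastD q := by
          rw [← hgr]
          exact chainEnd_stop ms g r q hgc hgap
        have hA1 : bodyA xs t ms (m, sp) q
            = (if g.getLastD q - q + 1 > m then (g.getLastD q - q + 1, q) else (m, sp)) := by
          unfold bodyA
          rw [if_neg hhead, hw, hce]
          simp only
          by_cases hSm : 1 + (g.getLastD q - q) > m
          · rw [if_pos hSm, if_pos (by omega)]
            simp only [Prod.mk.injEq]
            omega
          · rw [if_neg hSm, if_neg (by omega)]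
        -- invariants for the rest r
        have hpr : List.Pairwise (· < ·) r :=
          (List.pairwise_append.mp (List.pairwise_cons.mp hpair_gr).2).2.1
        have hcross : ∀ a ∈ g, ∀ b ∈ r, a < b :=
          (List.pairwise_append.mp (List.pairwise_cons.mp hpair_gr).2).2.2
        have hallr : ∀ x ∈ r, Tgt xs t x := fun x hx => hall_gr x (List.mem_append_right _ hx)
        have hTe : Tgt xs t (g.getLastD q) := by
          rcases List.mem_cons.mp (List.getLastD_mem_cons (l := g) (a := q)) with h | h
          · rw [h]; exact hTq
          · exact hall_gr _ (List.mem_append_left _ h)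
        have her : ∀ x ∈ r, g.getLastD q < x := by
          intro x hx
          rcases List.mem_cons.mp (List.getLastD_mem_cons (l := g) (a := q)) with h | h
          · rw [h]
            exact (List.pairwise_cons.mp hpair_gr).1 x (List.mem_append_right _ hx)
          · exact hcross _ h x hx
        have hcompr : ∀ j, g.getLastD q < j → Tgt xs t j → j ∈ r := by
          intro j hj htj
          rcases List.mem_append.mp (hcomp_gr j (by omega) htj) with h | h
          · exact absurd (he.2 j h) (by omega)
          · exact h
        have hrl : r.length ≤ n := by
          have : g.length + r.length = l2.length := by rw [← List.length_append, hgr]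
          omega
        rw [List.foldl_cons, List.foldl_cons, hA1, ← hgr, List.foldl_append, List.foldl_append]
        by_cases h1m : 1 > m
        · have hSm : g.getLastD q - q + 1 > m := by omega
          rw [if_pos hSm]
          have hB1 : bodyB ms (sp, m, pvOpt.map fun pv => (cs, pv)) q = (q, 1, some (q, q)) := by
            cases pvOpt with
            | none =>
              simp only [bodyB, Option.map_none]
              rw [show q - q + 1 = 1 from by omega, if_pos h1m]
            | some pv =>
              obtain ⟨_, _, _, hhd, _⟩ := hinv
              simp only [bodyB, Option.map_some]
              rw [if_pos (hhd q (by simp)), show q - q + 1 = 1 from by omega, if_pos h1m]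
          rw [hB1, GB2 ms q g q q 1 hgc (Or.inr ⟨rfl, by omega⟩)]
          rw [show (if g.getLastD q - q + 1 > 1
                then ((q : Int), g.getLastD q - q + 1, some (q, g.getLastD q))
                else ((q : Int), 1, some (q, g.getLastD q)))
              = ((q : Int), g.getLastD q - q + 1, some (q, g.getLastD q)) from by
            by_cases hE1 : g.getLastD q - q + 1 > 1
            · rw [if_pos hE1]
            · rw [if_neg hE1]
              simp only [Prod.mk.injEq]
              exact ⟨trivial, by omega, trivial⟩]
          have hGA : List.foldl (bodyA xs t ms) ((g.getLastD q - q + 1 : Int), q) g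
              = (g.getLastD q - q + 1, q) :=
            GA2 xs t ms r g q _ hgc hpair_gr hall_gr hcomp_gr hgap (le_refl _)
          rw [hGA]
          exact ih r hrl (some (g.getLastD q)) (g.getLastD q - q + 1) q q hpr hallr
            ⟨hTe, her, hcompr, fun z hz => hgap z hz, by omega⟩
        · have hm1 : 1 ≤ m := by omega
          have hB1 : bodyB ms (sp, m, pvOpt.map fun pv => (cs, pv)) q = (sp, m, some (q, q)) := by
            cases pvOpt with
            | none =>
              simp only [bodyB, Option.map_none]
              rw [show q - q + 1 = 1 from by omega, if_neg h1m]
            | some pv =>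
              obtain ⟨_, _, _, hhd, _⟩ := hinv
              simp only [bodyB, Option.map_some]
              rw [if_pos (hhd q (by simp)), show q - q + 1 = 1 from by omega, if_neg h1m]
          rw [hB1, GB2 ms q g q sp m hgc (Or.inl (by omega))]
          by_cases hSm : g.getLastD q - q + 1 > m
          · rw [if_pos hSm, if_pos hSm]
            have hGA : List.foldl (bodyA xs t ms) ((g.getLastD q - q + 1 : Int), q) g
                = (g.getLastD q - q + 1, q) :=
              GA2 xs t ms r g q _ hgc hpair_gr hall_gr hcomp_gr hgap (le_refl _)
            rw [hGA]
            exact ih r hrl (some (g.getLastD q)) (g.getLastD q - q + 1) q q hpr hallr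
              ⟨hTe, her, hcompr, fun z hz => hgap z hz, by omega⟩
          · rw [if_neg hSm, if_neg hSm]
            have hGA : List.foldl (bodyA xs t ms) (m, sp) g = (m, sp) :=
              GA2 xs t ms r g q _ hgc hpair_gr hall_gr hcomp_gr hgap
                (show g.getLastD q - q + 1 ≤ m from by omega)
            rw [hGA]
            exact ih r hrl (some (g.getLastD q)) m sp q hpr hallr
              ⟨hTe, her, hcompr, fun z hz => hgap z hz, hm1⟩

-- ===== VERDICT (by name: the statement is the Claim_ definition above) =====
theorem find_spec : Claim_equal_find := by
  intro xs t ms _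
  unfold Spec_find find find_alt
  rw [show (fun (acc : Int × Int) (pr : Int × Int) =>
      if pr.2 = t then
        if 0 < pr.1 ∧ PySem.List.pyGet? xs (pr.1 - 1) = some t then acc
        else
          let w := whileA xs t ms pr.1 1
          if w.2 > acc.1 then (w.2, w.1 - w.2 + 1) else acc
      else acc) = (fun acc pr => if pr.2 = t then bodyA xs t ms acc pr.1 else acc) from by
    funext acc pr; simp [bodyA]]
  rw [foldl_filter_tgt t (bodyA xs t ms)]
  rw [show (fun (st : Int × Int × Option (Int × Int)) (pr : Int × Int) =>
      if pr.2 ≠ t then st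
      else
        let run := match st.2.2 with
          | none => (pr.1, pr.1)
          | some r => if pr.1 - r.2 > ms then (pr.1, pr.1) else (r.1, pr.1)
        let span := pr.1 - run.1 + 1
        if span > st.2.1 then (run.1, span, some run) else (st.1, st.2.1, some run))
      = (fun st pr => if pr.2 ≠ t then st else bodyB ms st pr.1) from by
    funext st pr; simp [bodyB]]
  rw [foldl_filter_tgt' t (bodyB ms)]
  have h := MAIN xs t ms (tpos xs t).length (tpos xs t) le_rfl none 0 (-1) 0
    (tpos_pairwise xs t) (tpos_tgt xs t) (by exact ⟨rfl, tpos_complete xs t⟩)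
  simp only [Option.map_none] at h
  rw [show tpos xs t = ((PySem.List.enumerate xs 0).filter (fun pr => pr.2 == t)).map Prod.fst from rfl] at h
  rw [h]
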